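-- pv_equiv track=rewrite | github.com/jjunhub/coding-test | 프로그래머스/1/92334. 신고 결과 받기/신고 결과 받기.py | solution
-- ===== SOURCE A (Python) =====
-- from collections import defaultdict
--
-- def solution(id_list, report, k):
--     reported_set = defaultdict(set)
--     report_success_count = defaultdict(int)
--
--     for event in report:
--         blocker, blocked = event.split(" ")
--         reported_set[blocked].add(blocker)
--
--     for blocked in id_list:
--         if (len(reported_set[blocked])) >= k:
--             for blocker in reported_set[blocked]:
--                 report_success_count[blocker] += 1
--
--     answer = []
--     for _id in id_list:
--         answer.append(report_success_count[_id])
--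
--     return answer
-- ===== SOURCE B (Python) =====
-- def solution(id_list, report, k):
--     pairs = set()
--     for event in report:
--         blocker, blocked = event.split(" ")
--         pairs.add((blocker, blocked))
--     cnt = {}
--     for _, blocked in pairs:
--         cnt[blocked] = cnt.get(blocked, 0) + 1
--     banned = [u for u in id_list if cnt.get(u, 0) >= k]
--     return [sum(1 for b in banned if (u, b) in pairs) for u in id_list]
-- ===== Notes on version B (the rewrite author's own statement) =====
-- stated objective: alternative
-- what changed: A groups reporters into per-blocked sets and pushes credit into a global counter dict inside a nested loop; B dedups reports into a flat set of (blocker, blocked) pairs, tallies distinct reporters per blocked user, builds the banned list, and computes each user's answer directly by counting banned users they reported.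
import Mathlib
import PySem

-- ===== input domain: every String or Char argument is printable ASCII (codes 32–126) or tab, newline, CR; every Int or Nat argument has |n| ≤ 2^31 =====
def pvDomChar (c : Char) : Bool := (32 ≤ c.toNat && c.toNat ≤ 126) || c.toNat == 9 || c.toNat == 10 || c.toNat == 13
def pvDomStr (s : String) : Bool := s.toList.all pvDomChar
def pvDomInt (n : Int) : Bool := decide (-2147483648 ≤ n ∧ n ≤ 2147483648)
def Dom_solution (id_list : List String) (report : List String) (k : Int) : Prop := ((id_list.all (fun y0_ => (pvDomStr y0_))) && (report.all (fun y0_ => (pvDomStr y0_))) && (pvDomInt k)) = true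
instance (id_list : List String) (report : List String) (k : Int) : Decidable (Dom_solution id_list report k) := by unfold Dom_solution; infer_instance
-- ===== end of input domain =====

-- B replaces A's per-blocked sets of reporters + nested credit-tallying loop by a flat deduped
-- set of (blocker, blocked) pairs, a reporter count per blocked user, a banned list, and a direct
-- per-user count of banned users that user reported (alternative decomposition, not faster).

-- ===== PORT A =====
-- one step of A's first loop: 'blocker, blocked = event.split(" "); reported_set[blocked].add(blocker)'
-- (the non-2-parts branch, where Python raises ValueError, is excluded by Pre_solution below)
def rsStep (rs : PySem.Dict String (PySem.Set String)) (event : String) :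
    PySem.Dict String (PySem.Set String) :=
  match (PySem.Str.split? event " ").getD [] with
  | [blocker, blocked] => rs.insert blocked ((rs.getD blocked PySem.Set.empty).add blocker)
  | _ => rs

def solution (id_list : List String) (report : List String) (k : Int) : List Int :=
  let reported_set := report.foldl rsStep PySem.Dict.empty
  let report_success_count := id_list.foldl
    (fun counts blocked =>
      if k ≤ ((reported_set.getD blocked PySem.Set.empty).length : Int) then
        (reported_set.getD blocked PySem.Set.empty).foldl
          (fun c blocker => c.insert blocker (c.getD blocker 0 + 1)) counts
      else counts) PySem.Dict.empty
  id_list.map (fun _id => report_success_count.getD _id 0)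

-- ===== PORT B =====
-- one step of B's first loop: 'blocker, blocked = event.split(" "); pairs.add((blocker, blocked))'
def psStep (ps : PySem.Set (String × String)) (event : String) : PySem.Set (String × String) :=
  match (PySem.Str.split? event " ").getD [] with
  | [blocker, blocked] => ps.add (blocker, blocked)
  | _ => ps

def solution_alt (id_list : List String) (report : List String) (k : Int) : List Int :=
  let pairs := report.foldl psStep PySem.Set.empty
  let cnt := pairs.foldl (fun d p => d.insert p.2 (d.getD p.2 0 + 1)) PySem.Dict.empty
  let banned := id_list.filter (fun u => k ≤ cnt.getD u 0)
  id_list.map (fun u => ((banned.filter (fun b => pairs.contains (u, b))).map (fun _ => (1 : Int))).sum)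

-- ===== PRECONDITION & SPEC =====
-- Pre_ excludes exactly the reports that do not split on " " into two parts: there Python A
-- raises ValueError on unpacking (and B raises identically).
def Pre_solution (id_list : List String) (report : List String) (k : Int) : Prop :=
  ∀ e ∈ report, ((PySem.Str.split? e " ").getD []).length = 2
instance (id_list : List String) (report : List String) (k : Int) : Decidable (Pre_solution id_list report k) := by unfold Pre_solution; infer_instance
def pvWitness_solution : List String × List String × Int := (["muzi", "frodo"], ["muzi frodo", "frodo muzi"], 1)

def Spec_solution (id_list : List String) (report : List String) (k : Int) (out : List Int) : Prop := out = solution_alt id_list report k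
instance (id_list : List String) (report : List String) (k : Int) (out : List Int) : Decidable (Spec_solution id_list report k out) := by unfold Spec_solution; infer_instance

-- ===== CLAIM (what is proved, stated in full; the proofs are below) =====
def Claim_equal_solution : Prop := ∀ (id_list : List String) (report : List String) (k : Int), Dom_solution id_list report k → Pre_solution id_list report k → Spec_solution id_list report k (solution id_list report k)

-- ===== LEMMAS AND PROOFS =====

-- rewriting the loop steps once the split shape is known
theorem psStep_pair (e a b : String) (ps : PySem.Set (String × String))
    (h : (PySem.Str.split? e " ").getD [] = [a, b]) : psStep ps e = ps.add (a, b) := by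
  unfold psStep; rw [h]

theorem rsStep_pair (e a b : String) (rs : PySem.Dict String (PySem.Set String))
    (h : (PySem.Str.split? e " ").getD [] = [a, b]) :
    rsStep rs e = rs.insert b ((rs.getD b PySem.Set.empty).add a) := by
  unfold rsStep; rw [h]

theorem psStep_other (e : String) (ps : PySem.Set (String × String))
    (h : ((PySem.Str.split? e " ").getD []).length ≠ 2) : psStep ps e = ps := by
  unfold psStep; split
  · rename_i heq; rw [heq] at h; simp at h
  · rfl

theorem rsStep_other (e : String) (rs : PySem.Dict String (PySem.Set String))
    (h : ((PySem.Str.split? e " ").getD []).length ≠ 2) : rsStep rs e = rs := by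
  unfold rsStep; split
  · rename_i heq; rw [heq] at h; simp at h
  · rfl

-- The two first loops stay linked: the pairs of B with second component b, projected to their
-- first components, are exactly A's reporter set for b (and B's pair list stays duplicate-free).
theorem link_inv (report : List String) (rs : PySem.Dict String (PySem.Set String))
    (ps : PySem.Set (String × String)) (hnd : ps.Nodup)
    (hinv : ∀ b : String, (ps.filter (fun p => p.2 == b)).map Prod.fst = rs.getD b PySem.Set.empty) :
    (report.foldl psStep ps).Nodup ∧
      ∀ b : String, ((report.foldl psStep ps).filter (fun p => p.2 == b)).map Prod.fst
        = (report.foldl rsStep rs).getD b PySem.Set.empty := by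
  induction report generalizing rs ps with
  | nil => exact ⟨hnd, hinv⟩
  | cons e rest ih =>
    simp only [List.foldl_cons]
    rcases hsh : (PySem.Str.split? e " ").getD [] with _ | ⟨a, _ | ⟨b', _ | _⟩⟩
    case nil =>
      rw [psStep_other e ps (by rw [hsh]; simp), rsStep_other e rs (by rw [hsh]; simp)]
      exact ih rs ps hnd hinv
    case cons.nil =>
      rw [psStep_other e ps (by rw [hsh]; simp), rsStep_other e rs (by rw [hsh]; simp)]
      exact ih rs ps hnd hinv
    case cons.cons.cons =>
      rw [psStep_other e ps (by rw [hsh]; simp), rsStep_other e rs (by rw [hsh]; simp)]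
      exact ih rs ps hnd hinv
    case cons.cons.nil =>
      rw [psStep_pair e a b' ps hsh, rsStep_pair e a b' rs hsh]
      apply ih
      · -- Nodup after one add
        rw [PySem.Set.add_eq_ite]
        split_ifs with hm
        · exact hnd
        · exact List.Nodup.append hnd (List.nodup_singleton _) (by
            intro x hx hx'; simp at hx'; subst hx'; exact hm hx)
      · -- invariant after one step
        intro b
        by_cases hb : b = b'
        · subst hb
          have hmem : (a, b) ∈ ps ↔ a ∈ rs.getD b PySem.Set.empty := by
            rw [← hinv b]
            simp only [List.mem_map, List.mem_filter]
            constructor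
            · intro hp; exact ⟨(a, b), ⟨hp, by simp⟩, rfl⟩
            · rintro ⟨p, ⟨hp, hpb⟩, hpa⟩
              have : p = (a, b) := by
                cases p; simp_all
              rwa [this] at hp
          rw [PySem.Set.add_eq_ite, PySem.Set.add_eq_ite,
            PySem.Dict.getD_insert_self]
          split_ifs with h1 h2 h2
          · exact hinv b
          · exact absurd (hmem.mp h1) h2
          · exact absurd (hmem.mpr h2) h1
          · rw [List.filter_append, List.map_append, hinv b]
            simp
        · rw [PySem.Set.add_eq_ite, PySem.Dict.getD_insert_of_ne (hne := hb)]
          split_ifs with h1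
          · exact hinv b
          · rw [List.filter_append, List.map_append, hinv b]
            have : (fun p : String × String => p.2 == b) (a, b') = false := by
              simp [Ne.symm hb, hb]
            simp [this, hb]

-- count of a member of a duplicate-free list
theorem count_nodup {α : Type} [DecidableEq α] (l : List α) (h : l.Nodup) (a : α) :
    l.count a = if a ∈ l then 1 else 0 := by
  split_ifs with hm
  · exact List.count_eq_one_of_mem h hm
  · exact List.count_eq_zero_of_not_mem hm

-- A's crediting loop, characterised: what report_success_count holds for u after the id_list loop.
theorem aCounts (rs : PySem.Dict String (PySem.Set String)) (k : Int) (id_list : List String)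
    (c : PySem.Dict String Int) (hnd : ∀ b, (rs.getD b PySem.Set.empty).Nodup) (u : String) :
    (id_list.foldl
      (fun counts blocked =>
        if k ≤ ((rs.getD blocked PySem.Set.empty).length : Int) then
          (rs.getD blocked PySem.Set.empty).foldl
            (fun c blocker => c.insert blocker (c.getD blocker 0 + 1)) counts
        else counts) c).getD u 0
    = c.getD u 0 +
      ((id_list.filter (fun b => decide (k ≤ ((rs.getD b PySem.Set.empty).length : Int)))).countP
        (fun b => decide (u ∈ rs.getD b PySem.Set.empty)) : Int) := by
  induction id_list generalizing c with
  | nil => simp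
  | cons b rest ih =>
    simp only [List.foldl_cons, List.filter_cons]
    by_cases hk : k ≤ ((rs.getD b PySem.Set.empty).length : Int)
    · rw [if_pos hk, ih, PySem.Dict.getD_foldl_insert_add_one,
        count_nodup _ (hnd b) u]
      simp only [hk, decide_true, if_true, List.countP_cons]
      by_cases hm : u ∈ rs.getD b PySem.Set.empty <;> simp [hm] <;> push_cast <;> ring
    · rw [if_neg hk, ih, if_neg (by simpa using hk)]

-- B's counting loop over pairs, characterised
theorem cntFold {α β : Type} [DecidableEq β] (l : List (α × β)) (d : PySem.Dict β Int) (b : β) :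
    (l.foldl (fun d p => d.insert p.2 (d.getD p.2 0 + 1)) d).getD b 0
      = d.getD b 0 + ((l.map Prod.snd).count b : Int) := by
  induction l generalizing d with
  | nil => simp
  | cons p t ih =>
    rw [List.foldl_cons, ih, List.map_cons, List.count_cons, PySem.Dict.getD_insert]
    by_cases hb : b = p.2
    · simp [hb]; ring
    · simp [hb, Ne.symm hb]

-- ===== VERDICT (by name: the statement is the Claim_ definition above) =====
theorem solution_spec : Claim_equal_solution := by
  intro id_list report k _hdom _hpre
  unfold Spec_solution solution solution_alt
  obtain ⟨hnd, hinv⟩ := link_inv report PySem.Dict.empty PySem.Set.empty List.nodup_nil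
    (by intro b; simp [PySem.Set.empty])
  set rs := report.foldl rsStep PySem.Dict.empty with hrs
  set ps := report.foldl psStep PySem.Set.empty with hps
  -- set nodup for each blocked
  have hsnd : ∀ b, (rs.getD b PySem.Set.empty).Nodup := by
    intro b
    rw [← hinv b]
    refine List.Nodup.map_on ?_ (List.Nodup.filter _ hnd)
    intro x hx y hy hxy
    simp only [List.mem_filter, beq_iff_eq] at hx hy
    exact Prod.ext hxy (hx.2.trans hy.2.symm)
  -- membership link
  have hmem : ∀ u b, ((u, b) ∈ ps) ↔ u ∈ rs.getD b PySem.Set.empty := by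
    intro u b
    rw [← hinv b]
    simp only [List.mem_map, List.mem_filter]
    constructor
    · intro hp; exact ⟨(u, b), ⟨hp, by simp⟩, rfl⟩
    · rintro ⟨p, ⟨hp, hpb⟩, hpa⟩
      have : p = (u, b) := by cases p; simp_all
      rwa [this] at hp
  -- length link: cnt.getD b 0 = |rs.getD b ∅|
  have hcnt : ∀ b, (ps.foldl (fun d p => d.insert p.2 (d.getD p.2 0 + 1))
      PySem.Dict.empty).getD b 0 = ((rs.getD b PySem.Set.empty).length : Int) := by
    intro b
    rw [cntFold]
    have : (ps.map Prod.snd).count b = (ps.filter (fun p => p.2 == b)).length := by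
      rw [List.count_eq_countP, List.countP_map, List.countP_eq_length_filter]
      rfl
    rw [PySem.Dict.getD_empty, this, ← hinv b, List.length_map]
    simp
  -- both sides elementwise
  apply List.map_congr_left
  intro u _
  rw [aCounts rs k id_list PySem.Dict.empty hsnd u, PySem.Dict.getD_empty]
  have hconst : ∀ (l : List String), (l.map (fun _ => (1 : Int))).sum = (l.length : Int) := by
    intro l; induction l with
    | nil => simp
    | cons x t ih => simp only [List.map_cons, List.sum_cons, ih, List.length_cons]; omega
  rw [hconst, ← List.countP_eq_length_filter]
  have hfilter : id_list.filter (fun u' => decide (k ≤ (ps.foldl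
        (fun d p => d.insert p.2 (d.getD p.2 0 + 1)) PySem.Dict.empty).getD u' 0))
      = id_list.filter (fun b => decide (k ≤ ((rs.getD b PySem.Set.empty).length : Int))) := by
    apply List.filter_congr
    intro b _
    rw [hcnt b]
  rw [hfilter, zero_add]
  congr 1
  apply List.countP_congr
  intro b _
  simp only [decide_eq_true_eq, PySem.Set.contains, List.contains_iff_mem]
  exact (hmem u b).symm
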